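-- pv_equiv track=rewrite | github.com/StoyanStoyanov1/SoftUni-Fundamental-Exercises | list_advanced/list_advanced_exercise/which_are_in.py | which_are_in
-- ===== SOURCE A (Python) =====
-- def which_are_in(first_sequences, second_sequences):
--     result = []
--     for first_word in first_sequences:
--         for second_word in second_sequences:
--             if first_word in second_word:
--                 result.append(first_word)
--                 break
--     return result
-- ===== SOURCE B (Python) =====
-- def which_are_in(first_sequences, second_sequences):
--     subs = set()
--     for word in second_sequences:
--         n = len(word)
--         for i in range(n + 1):
--             for j in range(i, n + 1):
--                 subs.add(word[i:j])
--     return [w for w in first_sequences if w in subs]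
-- ===== Notes on version B (the rewrite author's own statement) =====
-- stated objective: faster
-- what changed: Instead of scanning every second word per first word, B precomputes a set of all substrings of the second words once and answers each first word with a single set lookup.
import Mathlib
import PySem

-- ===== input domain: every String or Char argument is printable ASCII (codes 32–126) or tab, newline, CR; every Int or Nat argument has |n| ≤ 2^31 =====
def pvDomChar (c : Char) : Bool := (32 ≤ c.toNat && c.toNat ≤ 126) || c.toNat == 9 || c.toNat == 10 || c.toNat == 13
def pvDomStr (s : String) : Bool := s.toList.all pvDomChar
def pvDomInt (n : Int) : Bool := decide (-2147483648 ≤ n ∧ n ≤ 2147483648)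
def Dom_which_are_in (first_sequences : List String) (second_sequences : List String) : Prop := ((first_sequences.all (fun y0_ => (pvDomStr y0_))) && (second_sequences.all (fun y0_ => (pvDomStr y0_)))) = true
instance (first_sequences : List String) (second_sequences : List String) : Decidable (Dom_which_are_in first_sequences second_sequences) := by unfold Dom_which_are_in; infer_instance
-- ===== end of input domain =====

-- B replaces A's per-first-word scan of the second words by a precomputed set of all
-- substrings of the second words, so each first word costs one set lookup (objective: faster).

-- ===== PORT A =====
-- inner 'for second_word in second_sequences: if first_word in second_word: result.append(first_word); break'
def pvInnerA (first_word : String) (result : List String) : List String → List String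
  | [] => result
  | second_word :: rest =>
      if PySem.Str.isIn first_word second_word then result ++ [first_word]
      else pvInnerA first_word result rest

def which_are_in (first_sequences : List String) (second_sequences : List String) : List String :=
  first_sequences.foldl (fun result first_word => pvInnerA first_word result second_sequences) []

-- ===== PORT B =====
-- 'for i in range(n+1): for j in range(i, n+1): subs.add(word[i:j])'
def pvSubsOf (subs : PySem.Set String) (word : String) : PySem.Set String :=
  (PySem.List.pyRange 0 (PySem.Str.len word + 1) 1).foldl (fun subs i =>
    (PySem.List.pyRange i (PySem.Str.len word + 1) 1).foldl (fun subs j =>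
      PySem.Set.add subs (PySem.Str.slice word (some i) (some j))) subs) subs

def which_are_in_alt (first_sequences : List String) (second_sequences : List String) : List String :=
  let subs := second_sequences.foldl pvSubsOf PySem.Set.empty
  first_sequences.filter (fun w => PySem.Set.contains subs w)

-- ===== PRECONDITION & SPEC =====
def Spec_which_are_in (first_sequences : List String) (second_sequences : List String) (out : List String) : Prop := out = which_are_in_alt first_sequences second_sequences
instance (first_sequences : List String) (second_sequences : List String) (out : List String) : Decidable (Spec_which_are_in first_sequences second_sequences out) := by unfold Spec_which_are_in; infer_instance

-- ===== CLAIM (what is proved, stated in full; the proofs are below) =====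
def Claim_equal_which_are_in : Prop := ∀ (first_sequences : List String) (second_sequences : List String), Dom_which_are_in first_sequences second_sequences → Spec_which_are_in first_sequences second_sequences (which_are_in first_sequences second_sequences)

-- ===== LEMMAS AND PROOFS =====

-- A's inner loop appends first_word iff some second word contains it
theorem pvInnerA_eq (w : String) (res : List String) (ss : List String) :
    pvInnerA w res ss = if ss.any (fun s => PySem.Str.isIn w s) then res ++ [w] else res := by
  induction ss with
  | nil => simp [pvInnerA]
  | cons s rest ih =>
      simp only [pvInnerA, List.any_cons]
      by_cases h : PySem.Str.isIn w s = true
      · rw [if_pos h]; simp only [h]; simp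
      · rw [if_neg h, ih]
        rw [Bool.not_eq_true] at h
        simp only [h]; simp

-- membership in a fold of Set.add over a list of indices
theorem pvMemFoldAdd (l : List Int) (g : Int → String) (acc : PySem.Set String) (x : String) :
    x ∈ l.foldl (fun a j => PySem.Set.add a (g j)) acc ↔ x ∈ acc ∨ ∃ j ∈ l, x = g j := by
  induction l generalizing acc with
  | nil => simp
  | cons j rest ih =>
      simp only [List.foldl_cons, ih, PySem.Set.mem_add, List.mem_cons]
      constructor
      · rintro ((h | h) | ⟨k, hk, hx⟩)
        · exact Or.inl h
        · exact Or.inr ⟨j, Or.inl rfl, h⟩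
        · exact Or.inr ⟨k, Or.inr hk, hx⟩
      · rintro (h | ⟨k, (rfl | hk), hx⟩)
        · exact Or.inl (Or.inl h)
        · exact Or.inl (Or.inr hx)
        · exact Or.inr ⟨k, hk, hx⟩

-- a clamped slice of a list is an infix of it
theorem pvTakeDropInfix {α : Type} (l : List α) (a n : Nat) :
    List.take n (List.drop a l) <:+: l :=
  ((List.take_prefix n (List.drop a l)).isInfix).trans (List.drop_suffix a l).isInfix

-- the slices word[i:j], 0 ≤ i ≤ j ≤ len, are exactly the infixes of word
theorem pvSliceRangeIffInfix (word x : String) :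
    (∃ i ∈ PySem.List.pyRange 0 (PySem.Str.len word + 1) 1,
       ∃ j ∈ PySem.List.pyRange i (PySem.Str.len word + 1) 1,
         x = PySem.Str.slice word (some i) (some j)) ↔ x.toList <:+: word.toList := by
  constructor
  · rintro ⟨i, hi, j, hj, rfl⟩
    rw [PySem.List.mem_pyRange_one] at hi hj
    have h0i : 0 ≤ i := hi.1
    have h0j : 0 ≤ j := le_trans h0i hj.1
    have : (PySem.Str.slice word (some i) (some j)).toList
        = List.take (j.toNat - i.toNat) (List.drop i.toNat word.toList) := by
      rw [PySem.Str.toList_slice, PySem.Chars.slice_eq_listSlice,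
        PySem.List.slice_toNat word.toList h0i h0j]
    rw [this]
    exact pvTakeDropInfix _ _ _
  · rintro ⟨t, u, h⟩
    refine ⟨(t.length : Int), ?_, (t.length : Int) + (x.toList.length : Int), ?_, ?_⟩
    · rw [PySem.List.mem_pyRange_one]
      have hlen : t.length + x.toList.length + u.length = word.toList.length := by
        rw [← h]; simp only [List.length_append]
      rw [PySem.Str.len_eq]
      omega
    · rw [PySem.List.mem_pyRange_one]
      have hlen : t.length + x.toList.length + u.length = word.toList.length := by
        rw [← h]; simp only [List.length_append]
      rw [PySem.Str.len_eq]
      omega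
    · apply String.toList_inj.mp
      rw [PySem.Str.toList_slice, PySem.Chars.slice_eq_listSlice,
        PySem.List.slice_natCast_add word.toList t.length x.toList.length]
      rw [← h, List.append_assoc, List.drop_left, List.take_left]

-- membership in B's substring set of a single word
theorem pvMemSubsOf (acc : PySem.Set String) (word x : String) :
    x ∈ pvSubsOf acc word ↔ x ∈ acc ∨ x.toList <:+: word.toList := by
  unfold pvSubsOf
  rw [← pvSliceRangeIffInfix word x]
  generalize PySem.List.pyRange 0 (PySem.Str.len word + 1) 1 = outer
  induction outer generalizing acc with
  | nil => simp
  | cons i rest ih =>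
      simp only [List.foldl_cons, ih, pvMemFoldAdd, List.mem_cons]
      constructor
      · rintro ((h | ⟨j, hj, hx⟩) | ⟨k, hk, j, hj, hx⟩)
        · exact Or.inl h
        · exact Or.inr ⟨i, Or.inl rfl, j, hj, hx⟩
        · exact Or.inr ⟨k, Or.inr hk, j, hj, hx⟩
      · rintro (h | ⟨k, (rfl | hk), j, hj, hx⟩)
        · exact Or.inl (Or.inl h)
        · exact Or.inl (Or.inr ⟨j, hj, hx⟩)
        · exact Or.inr ⟨k, hk, j, hj, hx⟩

-- membership in B's full substring set
theorem pvMemSubs (ss : List String) (acc : PySem.Set String) (x : String) :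
    x ∈ ss.foldl pvSubsOf acc ↔ x ∈ acc ∨ ∃ s ∈ ss, x.toList <:+: s.toList := by
  induction ss generalizing acc with
  | nil => simp
  | cons s rest ih =>
      simp only [List.foldl_cons, ih, pvMemSubsOf, List.mem_cons]
      constructor
      · rintro ((h | h) | ⟨k, hk, hx⟩)
        · exact Or.inl h
        · exact Or.inr ⟨s, Or.inl rfl, h⟩
        · exact Or.inr ⟨k, Or.inr hk, hx⟩
      · rintro (h | ⟨k, (rfl | hk), hx⟩)
        · exact Or.inl (Or.inl h)
        · exact Or.inl (Or.inr hx)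
        · exact Or.inr ⟨k, hk, hx⟩

-- A's fold is [] ++ filter over the containment predicate
theorem pvAEqFilter (fs ss : List String) (acc : List String) :
    fs.foldl (fun result w => pvInnerA w result ss) acc
      = acc ++ fs.filter (fun w => ss.any (fun s => PySem.Str.isIn w s)) := by
  induction fs generalizing acc with
  | nil => simp
  | cons w rest ih =>
      rw [List.foldl_cons, pvInnerA_eq, ih]
      simp only [List.filter_cons]
      split_ifs with h1
      · simp
      · rfl

-- ===== VERDICT (by name: the statement is the Claim_ definition above) =====
theorem which_are_in_spec : Claim_equal_which_are_in := by
  intro fs ss _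
  unfold Spec_which_are_in which_are_in which_are_in_alt
  rw [pvAEqFilter, List.nil_append]
  apply List.filter_congr
  intro w _
  rw [Bool.eq_iff_iff, PySem.Set.contains_iff, pvMemSubs]
  simp only [List.any_eq_true, PySem.Str.isIn_iff_infix, PySem.Set.empty]
  simp
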